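-- pv_equiv track=rewrite | github.com/SveterCZE/advent-of-code-2015 | day5/day5.py | generate_unique_pairs
-- ===== SOURCE A (Python) =====
-- def generate_unique_pairs(word):
--     pairs_db = {}
--     for i in range(len(word) - 1):
--         pair = word[i] + word[i + 1]
--         if pair not in pairs_db:
--             pairs_db[pair] = [i]
--         else:
--             pairs_db[pair].append(i)
--     return pairs_db
-- ===== SOURCE B (Python) =====
-- def generate_unique_pairs(word):
--     ps = [word[i:i + 2] for i in range(len(word) - 1)]
--     return {p: [j for j, q in enumerate(ps) if q == p] for p in dict.fromkeys(ps)}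
-- ===== Notes on version B (the rewrite author's own statement) =====
-- stated objective: simpler
-- what changed: Replaces the incremental dict-building loop (insert-or-append per index) with a declarative dict comprehension over the distinct pairs (dict.fromkeys of the slice-built pair list) that groups each pair's indices by a full enumerate scan per key.
import Mathlib
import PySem

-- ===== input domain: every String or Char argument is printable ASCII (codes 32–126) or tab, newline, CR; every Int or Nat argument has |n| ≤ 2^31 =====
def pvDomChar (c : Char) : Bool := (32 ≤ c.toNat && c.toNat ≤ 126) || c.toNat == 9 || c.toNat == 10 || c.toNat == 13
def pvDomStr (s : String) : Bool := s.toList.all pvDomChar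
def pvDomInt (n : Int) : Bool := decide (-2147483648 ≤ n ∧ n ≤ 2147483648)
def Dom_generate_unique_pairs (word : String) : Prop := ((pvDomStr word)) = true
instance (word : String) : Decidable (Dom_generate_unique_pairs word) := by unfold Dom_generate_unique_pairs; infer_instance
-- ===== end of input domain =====

-- B replaces A's incremental insert-or-append dict loop by a dict comprehension over the
-- slice-built pair list, grouping each distinct pair's indices with an enumerate scan per key (simpler).

-- ===== PORT A =====
-- pair = word[i] + word[i + 1]  (both indices are in range whenever the loop runs, so the
-- `.getD ' '` default of the exact pyGet? primitive is never taken)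
def gupPair (word : String) (i : Int) : String :=
  String.ofList [(PySem.Str.pyGet? word i).getD ' ', (PySem.Str.pyGet? word (i + 1)).getD ' ']

def gupStep (word : String) (pairs_db : PySem.Dict String (List Int)) (i : Int) :
    PySem.Dict String (List Int) :=
  let pair := gupPair word i
  if pairs_db.contains pair = false then pairs_db.insert pair [i]
  else pairs_db.insert pair (pairs_db.getD pair [] ++ [i])

def generate_unique_pairs (word : String) : List (String × List Int) :=
  ((PySem.List.pyRange 0 (PySem.Str.len word - 1)).foldl (gupStep word) PySem.Dict.empty).items

-- ===== PORT B =====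
-- ps = [word[i:i+2] for i in range(len(word) - 1)]
def gupPairsB (word : String) : List String :=
  (PySem.List.pyRange 0 (PySem.Str.len word - 1)).map
    (fun i => PySem.Str.slice word (some i) (some (i + 2)))

-- [j for j, q in enumerate(ps) if q == p]
def gupGroupB (ps : List String) (p : String) : List Int :=
  (PySem.List.enumerate ps).foldl (fun acc jq => if jq.2 == p then acc ++ [jq.1] else acc) []

-- {p: [j for j, q in enumerate(ps) if q == p] for p in dict.fromkeys(ps)}
def generate_unique_pairs_alt (word : String) : List (String × List Int) :=
  let ps := gupPairsB word
  ((PySem.List.dedup ps).foldl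
    (fun (d : PySem.Dict String (List Int)) p => d.insert p (gupGroupB ps p))
    PySem.Dict.empty).items

-- ===== PRECONDITION & SPEC =====
def Spec_generate_unique_pairs (word : String) (out : List (String × List Int)) : Prop := out = generate_unique_pairs_alt word
instance (word : String) (out : List (String × List Int)) : Decidable (Spec_generate_unique_pairs word out) := by unfold Spec_generate_unique_pairs; infer_instance

-- ===== CLAIM (what is proved, stated in full; the proofs are below) =====
def Claim_equal_generate_unique_pairs : Prop := ∀ (word : String), Dom_generate_unique_pairs word → Spec_generate_unique_pairs word (generate_unique_pairs word)

-- ===== LEMMAS AND PROOFS =====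

-- A's insert-or-append branch is exactly Dict.modify with default []
theorem gupStep_eq_modify (word : String) (db : PySem.Dict String (List Int)) (i : Int) :
    gupStep word db i = db.modify (gupPair word i) [] (· ++ [i]) := by
  unfold gupStep PySem.Dict.modify
  by_cases h : db.contains (gupPair word i) = false
  · simp [h, PySem.Dict.getD_of_not_contains _ _ h]
  · simp [h]

-- lookup after B's insert loop: untouched keys
theorem gupB_getD_not_mem (v : String → List Int) (ps : List String)
    (d : PySem.Dict String (List Int)) (k : String) (hk : k ∉ ps) :
    (ps.foldl (fun d p => d.insert p (v p)) d).getD k [] = d.getD k [] := by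
  induction ps generalizing d with
  | nil => rfl
  | cons p t ih =>
      simp only [List.foldl_cons]
      rw [ih _ (fun h => hk (List.mem_cons_of_mem _ h)), PySem.Dict.getD_insert]
      have hne : k ≠ p := fun h => hk (by simp [h])
      simp [hne]

-- lookup after B's insert loop: a key that occurs gets its group value
theorem gupB_getD_mem (v : String → List Int) (ps : List String)
    (d : PySem.Dict String (List Int)) (k : String) (hk : k ∈ ps) :
    (ps.foldl (fun d p => d.insert p (v p)) d).getD k [] = v k := by
  induction ps generalizing d with
  | nil => cases hk
  | cons p t ih =>
      simp only [List.foldl_cons]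
      by_cases ht : k ∈ t
      · exact ih _ ht
      · have hp : k = p := (List.mem_cons.1 hk).resolve_right ht
        rw [gupB_getD_not_mem v t _ k ht, hp, PySem.Dict.getD_insert]
        simp

-- word[i:i+2] is the two-character list at i
theorem gup_slice_pair (cs : List Char) (n : Nat) (h : n + 1 < cs.length) :
    PySem.List.slice cs (some (n : Int)) (some ((n : Int) + 2)) = [cs[n], cs[n + 1]] := by
  have h2 : ((n : Int) + 2) = ((n : Int) + ((2 : Nat) : Int)) := by norm_num
  rw [h2, PySem.List.slice_natCast_add]
  have hd : cs.drop n = cs[n] :: cs.drop (n + 1) := (List.getElem_cons_drop (by omega)).symm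
  have hd2 : cs.drop (n + 1) = cs[n + 1] :: cs.drop (n + 2) := (List.getElem_cons_drop h).symm
  rw [hd, hd2]
  rfl

-- on every loop index, B's slice pair equals A's concatenated pair
theorem gup_pair_agree (word : String) (i : Int)
    (hi : i ∈ PySem.List.pyRange 0 (PySem.Str.len word - 1)) :
    PySem.List.pyGetD (gupPairsB word) i "" = gupPair word i := by
  obtain ⟨h0, hlt⟩ := PySem.List.mem_pyRange_one.1 hi
  obtain ⟨n, rfl⟩ := Int.eq_ofNat_of_zero_le h0
  have hn : n + 1 < word.toList.length := by
    have := PySem.Str.len_eq word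
    omega
  have hlt' : n < (PySem.List.pyRange 0 (PySem.Str.len word - 1)).length := by
    rw [PySem.List.length_pyRange_one]; omega
  have hps : PySem.List.pyGetD (gupPairsB word) (n : Int) "" =
      PySem.Str.slice word (some (n : Int)) (some ((n : Int) + 2)) := by
    rw [PySem.List.pyGetD_natCast]
    unfold gupPairsB
    rw [List.getD_eq_getElem?_getD, List.getElem?_map, List.getElem?_eq_getElem hlt']
    simp [PySem.List.getElem_pyRange_one]
  rw [hps]
  unfold gupPair
  simp only [PySem.Str.slice, PySem.Chars.slice, gup_slice_pair word.toList n hn]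
  have g1 : PySem.Str.pyGet? word (n : Int) = some word.toList[n] := by
    rw [PySem.Str.pyGet?_natCast, List.getElem?_eq_getElem (by omega)]
  have g2 : PySem.Str.pyGet? word ((n : Int) + 1) = some word.toList[n + 1] := by
    have : ((n : Int) + 1) = ((n + 1 : Nat) : Int) := by push_cast; ring
    rw [this, PySem.Str.pyGet?_natCast, List.getElem?_eq_getElem hn]
  rw [g1, g2]
  rfl

-- A's whole fold, re-indexed over B's pair list with indices attached
theorem gupA_fold_eq (word : String) :
    (PySem.List.pyRange 0 (PySem.Str.len word - 1)).foldl (gupStep word) PySem.Dict.empty =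
      ((PySem.List.enumerate (gupPairsB word)).map (fun jq => (jq.2, jq.1))).foldl
        (fun d p => d.modify p.1 [] (· ++ [p.2])) PySem.Dict.empty := by
  rw [List.foldl_map, PySem.List.enumerate_eq_map_pyRange (gupPairsB word) "", List.foldl_map]
  have hpl : (gupPairsB word).length = (PySem.Str.len word - 1).toNat := by
    unfold gupPairsB
    rw [List.length_map, PySem.List.length_pyRange_one]
    omega
  have hlen : PySem.List.pyRange 0 (PySem.List.len (gupPairsB word)) =
      PySem.List.pyRange 0 (PySem.Str.len word - 1) := by
    rw [PySem.List.len_eq, hpl]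
    by_cases h : PySem.Str.len word - 1 ≤ 0
    · rw [PySem.List.pyRange_one_eq_nil (by omega), PySem.List.pyRange_one_eq_nil h]
    · congr 1
      omega
  rw [hlen]
  refine (PySem.List.foldl_congr_mem _ _ _ _ ?_).symm
  intro acc i hi
  rw [gupStep_eq_modify, gup_pair_agree word i hi]

-- ===== VERDICT (by name: the statement is the Claim_ definition above) =====
theorem generate_unique_pairs_spec : Claim_equal_generate_unique_pairs := by
  intro word _
  unfold Spec_generate_unique_pairs generate_unique_pairs generate_unique_pairs_alt
  rw [gupA_fold_eq]
  set ps := gupPairsB word with hps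
  set e := PySem.List.enumerate ps with he
  set L := e.map (fun jq => (jq.2, jq.1)) with hL
  set dA := L.foldl (fun d p => d.modify p.1 [] (· ++ [p.2])) PySem.Dict.empty with hdA
  set dB := (PySem.List.dedup ps).foldl
    (fun (d : PySem.Dict String (List Int)) p => d.insert p (gupGroupB ps p))
    PySem.Dict.empty with hdB
  have hLfst : L.map (·.1) = ps := by
    rw [hL, List.map_map]
    exact PySem.List.map_snd_enumerate ps 0
  have hkA : dA.keys = PySem.Set.ofList ps := by
    rw [hdA, PySem.Dict.keys_foldl_modify_key L Prod.fst [] (fun _ p => (· ++ [p.2]))]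
    rw [PySem.Dict.keys_empty, ← hLfst]
    rfl
  have hkB : dB.keys = PySem.Set.ofList ps := by
    rw [hdB, PySem.Dict.keys_foldl_insert (PySem.List.dedup ps) (fun _ p => gupGroupB ps p),
      PySem.Dict.keys_empty, PySem.List.dedup_eq_ofList]
    exact PySem.Set.ofList_ofList ps
  have hnA : dA.keys.Nodup := by
    rw [hdA]
    exact PySem.Dict.nodup_keys_foldl_modify_key L Prod.fst [] _ _ PySem.Dict.nodup_keys_empty
  have hnB : dB.keys.Nodup := by
    rw [hdB]
    exact PySem.Dict.nodup_keys_foldl_insert (PySem.List.dedup ps) _ _ PySem.Dict.nodup_keys_empty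
  rw [PySem.Dict.items_eq_map_keys dA hnA [], PySem.Dict.items_eq_map_keys dB hnB [], hkA, hkB]
  refine List.map_congr_left ?_
  intro k hk
  have hkps : k ∈ ps := (PySem.Set.mem_ofList _ _).1 hk
  have hA : dA.getD k [] = (e.filter (fun jq => jq.2 == k)).map (·.1) := by
    rw [hdA, PySem.Dict.getD_foldl_modify_append, PySem.Dict.getD_empty, hL, List.filter_map]
    simp [Function.comp_def, List.map_map]
  have hB : dB.getD k [] = gupGroupB ps k := by
    rw [hdB]
    exact gupB_getD_mem _ (PySem.List.dedup ps) _ k ((PySem.List.mem_dedup _ _).2 hkps)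
  rw [hA, hB]
  unfold gupGroupB
  rw [← he, PySem.List.foldl_append_if (fun jq => jq.2 == k) (·.1) e []]
  rfl
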